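-- pv_equiv track=rewrite | github.com/dkwang62/MVC1 | app.py | get_internal_room_key
-- ===== SOURCE A (Python) =====
-- room_view_legend = {
--     "GV": "Garden",
--     "OV": "Ocean View",
--     "OF": "Oceanfront",
--     "S": "Standard",
--     "IS": "Island Side",
--     "PS": "Pool Low Flrs",
--     "PSH": "Pool High Flrs",
--     "UF": "Gulf Front",
--     "UV": "Gulf View",
--     "US": "Gulf Side",
--     "PH": "Penthouse",
--     "PHGV": "Penthouse Garden",
--     "PHOV": "Penthouse Ocean View",
--     "PHOF": "Penthouse Ocean Front",
--     "IV": "Island",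
--     "MG": "Garden",
--     "PHMA": "Penthouse Mountain",
--     "PHMK": "Penthouse Ocean",
--     "PHUF": "Penthouse Gulf Front",
--     "AP_Studio_MA": "AP Studio Mountain",
--     "AP_1BR_MA": "AP 1BR Mountain",
--     "AP_2BR_MA": "AP 2BR Mountain",
--     "AP_2BR_MK": "AP 2BR Ocean",
--     "LO": "Lock-Off",
--     "CV": "City",
--     "LV": "Lagoon",
--     "PV": "Pool",
--     "OS": "Oceanside",
--     "K": "King",
--     "DB": "Double Bed",
--     "MV": "Mountain",
--     "MA": "Mountain",
--     "MK": "Ocean"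
-- }
--
-- def get_internal_room_key(display_name):
--     reverse_legend = {v: k for k, v in room_view_legend.items()}
--     if display_name in reverse_legend:
--         return reverse_legend[display_name]
--     if display_name.startswith("AP "):
--         if display_name == "AP Studio Mountain":
--             return "AP_Studio_MA"
--         elif display_name == "AP 1BR Mountain":
--             return "AP_1BR_MA"
--         elif display_name == "AP 2BR Mountain":
--             return "AP_2BR_MA"
--         elif display_name == "AP 2BR Ocean":
--             return "AP_2BR_MK"
--     parts = display_name.split()
--     if not parts:
--         return display_name
--     base_parts = []
--     view_parts = []
--     found_view = False
--     for part in parts: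
--         if part in ["Mountain", "Ocean", "Penthouse", "Garden", "Front"] and not found_view:
--             found_view = True
--             view_parts.append(part)
--         else:
--             base_parts.append(part)
--             if found_view:
--                 view_parts.append(part)
--     base = " ".join(base_parts)
--     view_display = " ".join(view_parts)
--     view = reverse_legend.get(view_display, view_display)
--     return f"{base} {view}".strip()
-- ===== SOURCE B (Python) =====
-- room_view_legend = {
--     "GV": "Garden",
--     "OV": "Ocean View",
--     "OF": "Oceanfront",
--     "S": "Standard",
--     "IS": "Island Side",
--     "PS": "Pool Low Flrs",
--     "PSH": "Pool High Flrs",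
--     "UF": "Gulf Front",
--     "UV": "Gulf View",
--     "US": "Gulf Side",
--     "PH": "Penthouse",
--     "PHGV": "Penthouse Garden",
--     "PHOV": "Penthouse Ocean View",
--     "PHOF": "Penthouse Ocean Front",
--     "IV": "Island",
--     "MG": "Garden",
--     "PHMA": "Penthouse Mountain",
--     "PHMK": "Penthouse Ocean",
--     "PHUF": "Penthouse Gulf Front",
--     "AP_Studio_MA": "AP Studio Mountain",
--     "AP_1BR_MA": "AP 1BR Mountain",
--     "AP_2BR_MA": "AP 2BR Mountain",
--     "AP_2BR_MK": "AP 2BR Ocean",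
--     "LO": "Lock-Off",
--     "CV": "City",
--     "LV": "Lagoon",
--     "PV": "Pool",
--     "OS": "Oceanside",
--     "K": "King",
--     "DB": "Double Bed",
--     "MV": "Mountain",
--     "MA": "Mountain",
--     "MK": "Ocean"
-- }
--
-- _VIEW_WORDS = ("Mountain", "Ocean", "Penthouse", "Garden", "Front")
--
--
-- def _rev_lookup(name):
--     # last-wins reverse lookup: scan the legend pairs back to front, no inverted dict
--     for code, disp in reversed(list(room_view_legend.items())):
--         if disp == name:
--             return code
--     return None
--
--
-- def _split_view(parts):
--     # structural recursion: at the first view word, base = the words after it,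
--     # view = the suffix starting at it; otherwise prepend the head to base
--     if not parts:
--         return [], []
--     head, rest = parts[0], parts[1:]
--     if head in _VIEW_WORDS:
--         return rest, parts
--     base, view = _split_view(rest)
--     return [head] + base, view
--
--
-- def get_internal_room_key(display_name):
--     code = _rev_lookup(display_name)
--     if code is not None:
--         return code
--     parts = display_name.split()
--     if not parts:
--         return display_name
--     base_parts, view_parts = _split_view(parts)
--     view_display = " ".join(view_parts)
--     view = _rev_lookup(view_display)
--     if view is None:
--         view = view_display
--     return (" ".join(base_parts) + " " + view).strip()
-- ===== Notes on version B (the rewrite author's own statement) =====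
-- stated objective: alternative
-- what changed: B never builds an inverted dict: it resolves names by a last-wins linear scan of the legend pairs back to front, drops A's dead apartment-prefix branch chain (those names are legend values caught by the lookup), and replaces A's flag-accumulator word loop by a structural recursion that returns the (base, view-suffix) split at the first view word.
import Mathlib
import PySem

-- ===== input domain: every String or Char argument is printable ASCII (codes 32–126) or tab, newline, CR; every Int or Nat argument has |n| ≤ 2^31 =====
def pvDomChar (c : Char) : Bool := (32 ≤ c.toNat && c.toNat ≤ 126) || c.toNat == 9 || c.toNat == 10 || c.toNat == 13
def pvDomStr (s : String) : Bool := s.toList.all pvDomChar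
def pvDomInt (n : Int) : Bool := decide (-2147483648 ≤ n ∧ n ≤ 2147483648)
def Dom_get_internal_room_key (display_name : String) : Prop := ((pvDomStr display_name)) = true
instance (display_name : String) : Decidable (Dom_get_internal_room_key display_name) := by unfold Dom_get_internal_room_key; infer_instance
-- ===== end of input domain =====

-- B replaces A's inverted dict by a back-to-front linear scan of the legend pairs and A's
-- flag-accumulator word loop by a structural recursion splitting base/view (objective: alternative).

-- shared data table (the module-level legend literal, in its Python insertion order)
def legendItems : List (String × String) :=
  [("GV", "Garden"), ("OV", "Ocean View"), ("OF", "Oceanfront"), ("S", "Standard"),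
   ("IS", "Island Side"), ("PS", "Pool Low Flrs"), ("PSH", "Pool High Flrs"),
   ("UF", "Gulf Front"), ("UV", "Gulf View"), ("US", "Gulf Side"), ("PH", "Penthouse"),
   ("PHGV", "Penthouse Garden"), ("PHOV", "Penthouse Ocean View"), ("PHOF", "Penthouse Ocean Front"),
   ("IV", "Island"), ("MG", "Garden"), ("PHMA", "Penthouse Mountain"), ("PHMK", "Penthouse Ocean"),
   ("PHUF", "Penthouse Gulf Front"), ("AP_Studio_MA", "AP Studio Mountain"),
   ("AP_1BR_MA", "AP 1BR Mountain"), ("AP_2BR_MA", "AP 2BR Mountain"), ("AP_2BR_MK", "AP 2BR Ocean"),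
   ("LO", "Lock-Off"), ("CV", "City"), ("LV", "Lagoon"), ("PV", "Pool"), ("OS", "Oceanside"),
   ("K", "King"), ("DB", "Double Bed"), ("MV", "Mountain"), ("MA", "Mountain"), ("MK", "Ocean")]

-- ===== PORT A =====
def roomViewLegend : PySem.Dict String String := PySem.Dict.ofList legendItems

-- A's loop body: (base_parts, view_parts, found_view) updated per part
def aStep (st : List String × List String × Bool) (part : String) : List String × List String × Bool :=
  if part ∈ ["Mountain", "Ocean", "Penthouse", "Garden", "Front"] ∧ st.2.2 = false then
    (st.1, st.2.1 ++ [part], true)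
  else
    (st.1 ++ [part], if st.2.2 then st.2.1 ++ [part] else st.2.1, st.2.2)

def get_internal_room_key (display_name : String) : String :=
  let reverse_legend : PySem.Dict String String :=
    roomViewLegend.items.foldl (fun d kv => d.insert kv.2 kv.1) PySem.Dict.empty
  match reverse_legend.get? display_name with
  | some k => k
  | none =>
    -- Python's prefix-guarded if/elif block: a branch that hits returns, else it falls through
    let ap : Option String :=
      if PySem.Str.startswith display_name "AP " then
        if display_name = "AP Studio Mountain" then some "AP_Studio_MA"
        else if display_name = "AP 1BR Mountain" then some "AP_1BR_MA"
        else if display_name = "AP 2BR Mountain" then some "AP_2BR_MA"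
        else if display_name = "AP 2BR Ocean" then some "AP_2BR_MK"
        else none
      else none
    match ap with
    | some k => k
    | none =>
      let parts := PySem.Str.split₀ display_name
      if parts = [] then display_name
      else
        let st := parts.foldl aStep ([], [], false)
        let base := PySem.Str.join " " st.1
        let view_display := PySem.Str.join " " st.2.1
        let view := reverse_legend.getD view_display view_display
        PySem.Str.strip (base ++ " " ++ view)

-- ===== PORT B =====
-- last-wins reverse lookup without an inverted dict: first match scanning the pairs back to front
def revLookup (name : String) : Option String :=
  (legendItems.reverse.find? (fun kv => kv.2 == name)).map (·.1)

-- structural recursion: at the first view word the base is the words after it and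
-- the view is the suffix starting at it
def splitView : List String → List String × List String
  | [] => ([], [])
  | head :: rest =>
    if head ∈ ["Mountain", "Ocean", "Penthouse", "Garden", "Front"] then
      (rest, head :: rest)
    else
      let bv := splitView rest
      (head :: bv.1, bv.2)

def get_internal_room_key_alt (display_name : String) : String :=
  match revLookup display_name with
  | some code => code
  | none =>
    let parts := PySem.Str.split₀ display_name
    if parts = [] then display_name
    else
      let bv := splitView parts
      let view_display := PySem.Str.join " " bv.2
      let view := match revLookup view_display with
        | some v => v
        | none => view_display
      PySem.Str.strip (PySem.Str.join " " bv.1 ++ " " ++ view)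

-- ===== PRECONDITION & SPEC =====
def Spec_get_internal_room_key (display_name : String) (out : String) : Prop := out = get_internal_room_key_alt display_name
instance (display_name : String) (out : String) : Decidable (Spec_get_internal_room_key display_name out) := by unfold Spec_get_internal_room_key; infer_instance

-- ===== CLAIM (what is proved, stated in full; the proofs are below) =====
def Claim_equal_get_internal_room_key : Prop := ∀ (display_name : String), Dom_get_internal_room_key display_name → Spec_get_internal_room_key display_name (get_internal_room_key display_name)

-- ===== LEMMAS AND PROOFS =====

-- inverting a pair list by a fold of overwriting inserts = first match scanning it back to front
theorem get?_foldl_insert_swap (l : List (String × String)) (d : PySem.Dict String String)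
    (name : String) :
    (l.foldl (fun d kv => d.insert kv.2 kv.1) d).get? name =
      match l.reverse.find? (fun kv => kv.2 == name) with
      | some kv => some kv.1
      | none => d.get? name := by
  induction l generalizing d with
  | nil => simp
  | cons kv rest ih =>
      simp only [List.foldl_cons, List.reverse_cons, List.find?_append]
      rw [ih]
      cases hf : rest.reverse.find? (fun kv => kv.2 == name) with
      | some kv' => simp
      | none =>
          simp only [Option.none_or, List.find?_cons, List.find?_nil]
          by_cases h : kv.2 = name
          · subst h; simp [PySem.Dict.get?_insert_self]
          · have hb : (kv.2 == name) = false := by simp [h]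
            rw [PySem.Dict.get?_insert]
            simp [hb, Ne.symm h]

-- once found_view is true, every later part goes to BOTH lists
theorem aStep_foldl_true (l : List String) (bp vp : List String) :
    l.foldl aStep (bp, vp, true) = (bp ++ l, vp ++ l, true) := by
  induction l generalizing bp vp with
  | nil => simp
  | cons p rest ih =>
      simp only [List.foldl_cons, aStep]
      simp only [Bool.true_eq_false, and_false, if_false]
      rw [ih]
      simp

-- A's flag loop computes exactly B's structural split
theorem aStep_foldl_splitView (l : List String) (bp : List String) :
    l.foldl aStep (bp, [], false) =
      (bp ++ (splitView l).1, (splitView l).2, !(splitView l).2.isEmpty) := by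
  induction l generalizing bp with
  | nil => simp [splitView]
  | cons p rest ih =>
      simp only [List.foldl_cons, aStep, splitView]
      by_cases hp : p ∈ ["Mountain", "Ocean", "Penthouse", "Garden", "Front"]
      · rw [if_pos (And.intro hp trivial), if_pos hp, aStep_foldl_true]
        simp
      · rw [if_neg (fun h => hp h.1), if_neg hp]
        simp only [Bool.false_eq_true, if_false]
        rw [ih]
        simp

-- ===== VERDICT (by name: the statement is the Claim_ definition above) =====
set_option maxRecDepth 100000 in
theorem get_internal_room_key_spec : Claim_equal_get_internal_room_key := by
  intro s _
  unfold Spec_get_internal_room_key get_internal_room_key get_internal_room_key_alt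
  have hitems : roomViewLegend.items = legendItems := by decide
  have hmain : ∀ x : String,
      (List.foldl (fun (d : PySem.Dict String String) kv => d.insert kv.2 kv.1)
        PySem.Dict.empty roomViewLegend.items).get? x = revLookup x := by
    intro x
    rw [hitems, get?_foldl_insert_swap]
    unfold revLookup
    cases legendItems.reverse.find? (fun kv => kv.2 == x) with
    | some kv => simp
    | none => simp
  simp only [hmain]
  cases hg : revLookup s with
  | some k => rfl
  | none =>
    -- A's apartment-prefix chain is dead: each of its four names is a legend value, caught by hg
    have hap : (if PySem.Str.startswith s "AP " then
        if s = "AP Studio Mountain" then some "AP_Studio_MA"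
        else if s = "AP 1BR Mountain" then some "AP_1BR_MA"
        else if s = "AP 2BR Mountain" then some "AP_2BR_MA"
        else if s = "AP 2BR Ocean" then some "AP_2BR_MK"
        else none
      else (none : Option String)) = none := by
      split_ifs with h0 h1 h2 h3 h4
      · subst h1; exact absurd hg (by decide)
      · subst h2; exact absurd hg (by decide)
      · subst h3; exact absurd hg (by decide)
      · subst h4; exact absurd hg (by decide)
      · rfl
      · rfl
    simp only [hap]
    by_cases hp : PySem.Str.split₀ s = []
    · simp [hp]
    · simp only [if_neg hp]
      rw [aStep_foldl_splitView]
      simp only [List.nil_append, PySem.Dict.getD_eq_get?_getD, hmain]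
      cases revLookup (PySem.Str.join " " (splitView (PySem.Str.split₀ s)).2) with
      | some v => simp
      | none => simp
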